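-- pv_equiv track=rewrite | github.com/ConorSheehan1/ctci | mike/1_4.py | anagram_test
-- ===== SOURCE A (Python) =====
-- def anagram_test(orig, test):
--     if len(orig) != len(test):
--         return False
--
--     count_dict = {}
--     for char in orig:
--         if char in count_dict.keys():
--             count_dict[char] += 1
--         else:
--             count_dict[char] = 1
--
--     for char in test:
--         if char in count_dict.keys():
--             count_dict[char] -= 1
--             if count_dict[char] < 0:
--                 return False
--         else:
--             return False
--
--     return True
-- ===== SOURCE B (Python) =====
-- def anagram_test(orig, test):
--     return sorted(orig) == sorted(test)
-- ===== Notes on version B (the rewrite author's own statement) =====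
-- stated objective: simpler
-- what changed: Replaced the count-dictionary build pass and decrement pass with a single sort-and-compare: sorted(orig) == sorted(test).
import Mathlib
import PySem

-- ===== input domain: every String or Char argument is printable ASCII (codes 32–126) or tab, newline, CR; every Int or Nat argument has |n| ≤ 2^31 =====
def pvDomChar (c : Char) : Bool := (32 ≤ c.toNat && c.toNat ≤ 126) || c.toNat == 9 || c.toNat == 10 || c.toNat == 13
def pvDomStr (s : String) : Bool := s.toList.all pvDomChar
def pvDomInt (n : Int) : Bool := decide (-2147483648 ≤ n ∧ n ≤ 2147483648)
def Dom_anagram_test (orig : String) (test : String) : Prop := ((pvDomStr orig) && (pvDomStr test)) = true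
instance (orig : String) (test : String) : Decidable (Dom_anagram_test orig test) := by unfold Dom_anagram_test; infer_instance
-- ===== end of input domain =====

-- B replaces A's count-dictionary build/decrement passes by sort-and-compare (simpler; same results).

-- ===== PORT A =====
-- first loop of A: build the count dict
def anagramBuild (orig : List Char) : PySem.Dict Char Int :=
  orig.foldl (fun d c => if d.contains c then d.modify c 0 (· + 1) else d.insert c 1) PySem.Dict.empty

-- second loop of A: decrement, with the two early 'return False's
def anagramCheck (d : PySem.Dict Char Int) : List Char → Bool
  | [] => true
  | c :: rest =>
    if d.contains c then
      let d' := d.modify c 0 (· - 1)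
      if d'.getD c 0 < 0 then false
      else anagramCheck d' rest
    else false

def anagram_test (orig : String) (test : String) : Bool :=
  if orig.toList.length ≠ test.toList.length then false
  else anagramCheck (anagramBuild orig.toList) test.toList

-- ===== PORT B =====
def anagram_test_alt (orig : String) (test : String) : Bool :=
  PySem.List.sorted orig.toList (fun x => x) false == PySem.List.sorted test.toList (fun x => x) false

-- ===== PRECONDITION & SPEC =====
def Spec_anagram_test (orig : String) (test : String) (out : Bool) : Prop := out = anagram_test_alt orig test
instance (orig : String) (test : String) (out : Bool) : Decidable (Spec_anagram_test orig test out) := by unfold Spec_anagram_test; infer_instance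

-- ===== CLAIM (what is proved, stated in full; the proofs are below) =====
def Claim_equal_anagram_test : Prop := ∀ (orig : String) (test : String), Dom_anagram_test orig test → Spec_anagram_test orig test (anagram_test orig test)

-- ===== LEMMAS AND PROOFS =====

-- A's build step (contains-test then += / =1) coincides with Counter's modify step
lemma anagramBuild_eq_counter (orig : List Char) :
    anagramBuild orig = PySem.Dict.counter orig := by
  have hstep : (fun (d : PySem.Dict Char Int) c =>
      if d.contains c then d.modify c 0 (· + 1) else d.insert c 1)
      = (fun d c => d.modify c 0 (· + 1)) := by
    funext d c
    by_cases h : d.contains c = true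
    · simp [h]
    · simp only [Bool.not_eq_true] at h
      simp [h, PySem.Dict.modify, PySem.Dict.getD_of_not_contains _ _ h]
  rw [anagramBuild, hstep, PySem.Dict.counter_eq_foldl]

lemma anagramBuild_getD (orig : List Char) (c : Char) :
    (anagramBuild orig).getD c 0 = orig.count c := by
  rw [anagramBuild_eq_counter]; exact PySem.Dict.getD_counter orig c

lemma anagramBuild_contains (orig : List Char) (c : Char) :
    (anagramBuild orig).contains c = decide (c ∈ orig) := by
  rw [anagramBuild_eq_counter, PySem.Dict.contains_counter]
  simp

lemma anagramCheck_spec (ts : List Char) (d : PySem.Dict Char Int) :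
    anagramCheck d ts = true ↔
      ∀ c ∈ ts, d.contains c = true ∧ (ts.count c : Int) ≤ d.getD c 0 := by
  induction ts generalizing d with
  | nil => simp [anagramCheck]
  | cons c rest ih =>
    by_cases hc : d.contains c = true
    · simp only [anagramCheck, hc, if_true]
      rw [PySem.Dict.getD_modify_self]
      by_cases hneg : d.getD c 0 - 1 < 0
      · simp only [hneg, if_true]
        constructor
        · intro h; exact absurd h (by simp)
        · intro h
          have := (h c (by simp)).2
          have hcount : (1 : Int) ≤ ((c :: rest).count c : Int) := by
            have : 1 ≤ (c :: rest).count c := by simp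
            exact_mod_cast this
          omega
      · simp only [hneg, if_false]
        rw [ih]
        constructor
        · intro h x hx
          rcases List.mem_cons.mp hx with rfl | hxr
          · refine ⟨hc, ?_⟩
            by_cases hxr : x ∈ rest
            · have := (h x hxr).2
              rw [PySem.Dict.getD_modify_self] at this
              have : ((rest.count x : Int)) ≤ d.getD x 0 - 1 := this
              have hcc : (x :: rest).count x = rest.count x + 1 := by
                simp
              rw [hcc]; push_cast; omega
            · have hcc : (x :: rest).count x = 1 := by
                simp [List.count_eq_zero.mpr hxr]
              rw [hcc]; omega
          · have hcontains : d.contains x = true := by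
              have := (h x hxr).1
              rw [PySem.Dict.contains_modify] at this
              by_cases hxc : x = c
              · subst hxc; exact hc
              · simpa [hxc] using this
            refine ⟨hcontains, ?_⟩
            have h2 := (h x hxr).2
            by_cases hxc : x = c
            · subst hxc
              rw [PySem.Dict.getD_modify_self] at h2
              have hcc : (x :: rest).count x = rest.count x + 1 := by
                simp
              rw [hcc]; push_cast; omega
            · rw [PySem.Dict.getD_modify] at h2
              rw [if_neg hxc] at h2
              have hcc : (c :: rest).count x = rest.count x := by
                simp [Ne.symm hxc]
              rw [hcc]; exact h2
        · intro h x hx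
          have hmem : x ∈ c :: rest := List.mem_cons_of_mem _ hx
          have h1 := (h x hmem).1
          have h2 := (h x hmem).2
          refine ⟨by rw [PySem.Dict.contains_modify]; simp [h1], ?_⟩
          by_cases hxc : x = c
          · subst hxc
            rw [PySem.Dict.getD_modify_self]
            have hcc : (x :: rest).count x = rest.count x + 1 := by
              simp
            rw [hcc] at h2; push_cast at h2; omega
          · rw [PySem.Dict.getD_modify, if_neg hxc]
            have hcc : (c :: rest).count x = rest.count x := by
              simp [Ne.symm hxc]
            rw [hcc] at h2; exact h2
    · simp only [anagramCheck, hc]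
      constructor
      · intro h; exact absurd h (by simp)
      · intro h
        have := (h c (by simp)).1
        exact absurd this hc

lemma anagram_test_true_iff (orig test : String) :
    anagram_test orig test = true ↔ orig.toList.Perm test.toList := by
  rw [anagram_test]
  by_cases hlen : orig.toList.length = test.toList.length
  · simp only [hlen, ne_eq, not_true_eq_false, if_false]
    rw [anagramCheck_spec]
    constructor
    · intro h
      have hle : ∀ c, test.toList.count c ≤ orig.toList.count c := by
        intro c
        by_cases hm : c ∈ test.toList
        · have := (h c hm).2
          rw [anagramBuild_getD] at this
          exact_mod_cast this
        · simp [List.count_eq_zero.mpr hm]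
      -- lengths equal + pointwise ≤ on counts ⇒ permutation (via multisets)
      have hM : (test.toList : Multiset Char) ≤ (orig.toList : Multiset Char) := by
        rw [Multiset.le_iff_count]
        intro c; simpa using hle c
      have hcard : Multiset.card (orig.toList : Multiset Char) ≤ Multiset.card (test.toList : Multiset Char) := by
        simpa using hlen.le
      have := Multiset.eq_of_le_of_card_le hM hcard
      exact Multiset.coe_eq_coe.mp this.symm
    · intro hperm c hmem
      refine ⟨?_, ?_⟩
      · rw [anagramBuild_contains]
        exact decide_eq_true (hperm.mem_iff.mpr hmem)
      · rw [anagramBuild_getD]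
        exact_mod_cast (hperm.count_eq c).symm.le
  · simp only [hlen, ne_eq, not_false_eq_true, if_true]
    constructor
    · intro h; exact absurd h (by simp)
    · intro hperm; exact absurd hperm.length_eq hlen

-- ===== VERDICT (by name: the statement is the Claim_ definition above) =====
theorem anagram_test_spec : Claim_equal_anagram_test := by
  intro orig test _
  unfold Spec_anagram_test anagram_test_alt
  rcases Bool.eq_false_or_eq_true (anagram_test orig test) with h | h
  · rw [h]
    symm
    rw [beq_iff_eq]
    exact (PySem.List.sorted_id_eq_sorted_id_iff_perm _ _).mpr
      ((anagram_test_true_iff orig test).mp h)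
  · rw [h]
    symm
    rw [beq_eq_false_iff_ne]
    intro hs
    have hperm : orig.toList.Perm test.toList :=
      (PySem.List.sorted_id_eq_sorted_id_iff_perm _ _).mp hs
    have := (anagram_test_true_iff orig test).mpr hperm
    rw [this] at h
    exact absurd h (by decide)
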